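-- pv_equiv track=rewrite | github.com/hjs0522/Algorithm | 스위치와램프.py | powerOff
-- ===== SOURCE A (Python) =====
-- def powerOff(switch,lamp,idx):
--     flag = True
--     for i in range(len(switch[idx])):
--         lampIdx = switch[idx][i]
--         lamp[lampIdx] -=1
--
--         if lamp[lampIdx] <= 0:
--             flag = False
--     for i in range(len(switch[idx])):
--         lampIdx = switch[idx][i]
--         lamp[lampIdx] +=1
--     return flag
-- ===== SOURCE B (Python) =====
-- def powerOff(switch, lamp, idx):
--     toggled = switch[idx]
--     after = list(lamp)
--     for l in toggled:
--         after[l] -= 1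
--     return all(after[l] > 0 for l in toggled)
-- ===== Notes on version B (the rewrite author's own statement) =====
-- stated objective: simpler
-- what changed: B decrements a fresh copy of lamp once and checks the final values of the toggled lamps, replacing A's in-place decrement with interleaved flag checks plus a separate restore loop; lamp itself is never mutated (A restores it, so only the return value is observable).
import Mathlib
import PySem

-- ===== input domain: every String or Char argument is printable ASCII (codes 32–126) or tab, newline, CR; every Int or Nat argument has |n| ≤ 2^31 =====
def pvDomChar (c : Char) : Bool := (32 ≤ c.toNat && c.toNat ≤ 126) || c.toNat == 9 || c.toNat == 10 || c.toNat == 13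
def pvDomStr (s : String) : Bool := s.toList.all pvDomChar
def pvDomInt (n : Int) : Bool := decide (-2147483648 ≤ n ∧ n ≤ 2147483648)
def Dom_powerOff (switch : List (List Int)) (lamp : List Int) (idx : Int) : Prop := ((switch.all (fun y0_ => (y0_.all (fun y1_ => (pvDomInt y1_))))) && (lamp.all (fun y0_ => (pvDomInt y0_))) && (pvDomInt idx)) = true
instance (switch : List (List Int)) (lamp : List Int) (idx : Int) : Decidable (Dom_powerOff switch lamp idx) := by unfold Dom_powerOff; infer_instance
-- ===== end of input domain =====

-- B decrements a fresh copy of lamp and checks the toggled lamps' final values, replacing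
-- A's in-place decrement / flag bookkeeping / restore loop (simpler; A restores lamp fully,
-- so only the return value is observable).

-- ===== PORT A =====
def powerOff (switch : List (List Int)) (lamp : List Int) (idx : Int) : Bool :=
  let s := (PySem.List.pyGet? switch idx).getD []
  let res := s.foldl (fun (st : List Int × Bool) lampIdx =>
      let lam := PySem.List.pySetD st.1 lampIdx (PySem.List.pyGetD st.1 lampIdx 0 - 1)
      (lam, if PySem.List.pyGetD lam lampIdx 0 ≤ 0 then false else st.2)) (lamp, true)
  -- restore loop: mutates lamp back, does not affect the returned flag
  let _restored := s.foldl (fun lam lampIdx =>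
      PySem.List.pySetD lam lampIdx (PySem.List.pyGetD lam lampIdx 0 + 1)) res.1
  res.2

-- ===== PORT B =====
def powerOff_alt (switch : List (List Int)) (lamp : List Int) (idx : Int) : Bool :=
  let toggled := (PySem.List.pyGet? switch idx).getD []
  let after := toggled.foldl (fun a l =>
      PySem.List.pySetD a l (PySem.List.pyGetD a l 0 - 1)) lamp
  toggled.all (fun l => decide (0 < PySem.List.pyGetD after l 0))

-- ===== PRECONDITION & SPEC =====
-- Pre_ excludes exactly the inputs where Python A raises IndexError: idx out of range for
-- switch, or some lamp index in switch[idx] out of range for lamp.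
def Pre_powerOff (switch : List (List Int)) (lamp : List Int) (idx : Int) : Prop :=
  PySem.Raise.InRange switch.length idx ∧
    ∀ l ∈ (PySem.List.pyGet? switch idx).getD [], PySem.Raise.InRange lamp.length l
instance (switch : List (List Int)) (lamp : List Int) (idx : Int) : Decidable (Pre_powerOff switch lamp idx) := by unfold Pre_powerOff; infer_instance
def pvWitness_powerOff : List (List Int) × List Int × Int := ([[0, 1, 0], [1]], [5, 2], 0)

def Spec_powerOff (switch : List (List Int)) (lamp : List Int) (idx : Int) (out : Bool) : Prop := out = powerOff_alt switch lamp idx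
instance (switch : List (List Int)) (lamp : List Int) (idx : Int) (out : Bool) : Decidable (Spec_powerOff switch lamp idx out) := by unfold Spec_powerOff; infer_instance

-- ===== CLAIM (what is proved, stated in full; the proofs are below) =====
def Claim_equal_powerOff : Prop := ∀ (switch : List (List Int)) (lamp : List Int) (idx : Int), Dom_powerOff switch lamp idx → Pre_powerOff switch lamp idx → Spec_powerOff switch lamp idx (powerOff switch lamp idx)

-- ===== LEMMAS AND PROOFS =====

def pvNrm (n : Nat) (l : Int) : Nat := if 0 ≤ l then l.toNat else (l + n).toNat

lemma pvNrm_lt {n : Nat} {l : Int} (h : PySem.Raise.InRange n l) : pvNrm n l < n := by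
  rcases h with ⟨h1, h2⟩; unfold pvNrm; split <;> omega

lemma pyGetD_nrm (lam : List Int) {l : Int} (d : Int) (h : PySem.Raise.InRange lam.length l) :
    PySem.List.pyGetD lam l d = lam.getD (pvNrm lam.length l) d := by
  rcases h with ⟨h1, h2⟩
  simp [PySem.List.pyGetD, PySem.List.pyGet?, PySem.List.pyIdx?, pvNrm, List.getD]
  split
  · simp
  · have : lam.length - (-l).toNat = (l + lam.length).toNat := by omega
    simp [this]

lemma pySetD_nrm (lam : List Int) {l : Int} (v : Int) (h : PySem.Raise.InRange lam.length l) :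
    PySem.List.pySetD lam l v = lam.set (pvNrm lam.length l) v := by
  rcases h with ⟨h1, h2⟩
  simp [PySem.List.pySetD, PySem.List.pySet?, PySem.List.pyIdx?, pvNrm]
  split
  · simp
  · have : lam.length - (-l).toNat = (l + lam.length).toNat := by omega
    simp [this]

-- characterisation of A's flag: true iff every toggled lamp's final value is still positive
lemma loopA (n : Nat) (s : List Int) (lam : List Int) (flag : Bool)
    (hn : lam.length = n) (h : ∀ l ∈ s, PySem.Raise.InRange n l) :
    (s.foldl (fun (st : List Int × Bool) lampIdx =>
        let lam := PySem.List.pySetD st.1 lampIdx (PySem.List.pyGetD st.1 lampIdx 0 - 1)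
        (lam, if PySem.List.pyGetD lam lampIdx 0 ≤ 0 then false else st.2)) (lam, flag)).2
      = (flag && decide (∀ l ∈ s, ((s.map (pvNrm n)).count (pvNrm n l) : Int) < lam.getD (pvNrm n l) 0)) := by
  induction s generalizing lam flag with
  | nil => simp
  | cons l₀ tl ih =>
    subst hn
    have hl₀ : PySem.Raise.InRange lam.length l₀ := h l₀ (by simp)
    have htl : ∀ l ∈ tl, PySem.Raise.InRange lam.length l := fun l hl => h l (by simp [hl])
    set k := pvNrm lam.length l₀ with hk
    have hklt : k < lam.length := pvNrm_lt hl₀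
    set a := lam.getD k 0 with ha
    have hset : PySem.List.pySetD lam l₀ (PySem.List.pyGetD lam l₀ 0 - 1) = lam.set k (a - 1) := by
      rw [pySetD_nrm lam _ hl₀, pyGetD_nrm lam _ hl₀]
    have hlen : (lam.set k (a - 1)).length = lam.length := by simp
    have hget : PySem.List.pyGetD (lam.set k (a - 1)) l₀ 0 = a - 1 := by
      rw [pyGetD_nrm _ _ (by rw [hlen]; exact hl₀)]
      rw [hlen, ← hk]
      simp [List.getD, hklt]
    have hsetk : (lam.set k (a - 1)).getD k 0 = a - 1 := by simp [List.getD, hklt]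
    have hifb : (if a - 1 ≤ 0 then false else flag) = (flag && decide (0 < a - 1)) := by
      split_ifs with hle <;> cases flag <;> simp <;> omega
    simp only [List.foldl_cons, hset, hget, hifb]
    rw [ih (lam.set k (a - 1)) _ hlen (fun l hl => hlen ▸ htl l hl)]
    rw [Bool.eq_iff_iff]
    simp only [Bool.and_eq_true, decide_eq_true_eq, List.mem_cons, and_assoc]
    have hcnt : ∀ j : Nat, ((l₀ :: tl).map (pvNrm lam.length)).count j
        = (tl.map (pvNrm lam.length)).count j + (if j = k then 1 else 0) := by
      intro j
      rw [List.map_cons, List.count_cons, ← hk]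
      rcases eq_or_ne j k with hjk | hjk
      · simp [hjk]
      · simp [hjk, Ne.symm hjk]
    have hQ : ∀ l ∈ tl,
        ((((tl.map (pvNrm lam.length)).count (pvNrm lam.length l) : Int)
            < (lam.set k (a - 1)).getD (pvNrm lam.length l) 0)
          ↔ ((((l₀ :: tl).map (pvNrm lam.length)).count (pvNrm lam.length l) : Int)
            < lam.getD (pvNrm lam.length l) 0)) := by
      intro l hl
      rw [hcnt]
      by_cases hek : pvNrm lam.length l = k
      · rw [hek, hsetk, if_pos rfl]
        push_cast; omega
      · have h2 : (lam.set k (a - 1)).getD (pvNrm lam.length l) 0 = lam.getD (pvNrm lam.length l) 0 := by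
          simp [List.getD, Ne.symm hek]
        rw [h2, if_neg hek]
        simp
    constructor
    · rintro ⟨hflag, hpos, hall⟩
      refine ⟨hflag, ?_⟩
      intro l hl
      rcases hl with rfl | hl
      · rw [← hk, ← ha, hcnt, if_pos rfl]
        by_cases hc : 0 < (tl.map (pvNrm lam.length)).count k
        · obtain ⟨l', hl', hl'k⟩ := List.mem_map.mp (List.count_pos_iff.mp hc)
          have h1 := hall l' hl'
          rw [hl'k, hsetk] at h1
          push_cast at h1 ⊢
          omega
        · have h0 : (tl.map (pvNrm lam.length)).count k = 0 := by omega
          rw [h0]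
          push_cast
          omega
      · exact (hQ l hl).mp (hall l hl)
    · rintro ⟨hflag, hall⟩
      have hhead := hall l₀ (Or.inl rfl)
      rw [← hk, ← ha, hcnt, if_pos rfl] at hhead
      have hc : (0:Int) ≤ ((tl.map (pvNrm lam.length)).count k : Int) := by positivity
      refine ⟨hflag, by push_cast at hhead; omega, fun l hl => (hQ l hl).mpr (hall l (Or.inr hl))⟩

-- characterisation of B's decrement fold: final value at k = initial value - occurrence count
lemma decFold (s : List Int) (lam : List Int)
    (h : ∀ l ∈ s, PySem.Raise.InRange lam.length l) :
    (s.foldl (fun a l => PySem.List.pySetD a l (PySem.List.pyGetD a l 0 - 1)) lam).length = lam.length ∧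
    ∀ k : Nat, (s.foldl (fun a l => PySem.List.pySetD a l (PySem.List.pyGetD a l 0 - 1)) lam).getD k 0
        = lam.getD k 0 - ((s.map (pvNrm lam.length)).count k : Int) := by
  induction s generalizing lam with
  | nil => simp
  | cons l₀ tl ih =>
    have hl₀ : PySem.Raise.InRange lam.length l₀ := h l₀ (by simp)
    set k₀ := pvNrm lam.length l₀ with hk₀
    have hk₀lt : k₀ < lam.length := pvNrm_lt hl₀
    set a := lam.getD k₀ 0 with ha
    have hset : PySem.List.pySetD lam l₀ (PySem.List.pyGetD lam l₀ 0 - 1) = lam.set k₀ (a - 1) := by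
      rw [pySetD_nrm lam _ hl₀, pyGetD_nrm lam _ hl₀]
    have hlen : (lam.set k₀ (a - 1)).length = lam.length := by simp
    obtain ⟨ihlen, ihval⟩ := ih (lam.set k₀ (a - 1))
      (fun l hl => hlen ▸ h l (by simp [hl]))
    simp only [List.foldl_cons, hset]
    refine ⟨by rw [ihlen, hlen], fun k => ?_⟩
    rw [ihval k, hlen]
    have hsv : (lam.set k₀ (a - 1)).getD k 0
        = lam.getD k 0 - (if k = k₀ then 1 else 0) := by
      rcases eq_or_ne k k₀ with rfl | hne
      · rw [ha]; simp [List.getD, hk₀lt]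
      · simp [List.getD, Ne.symm hne, hne]
    have hcnt : (((l₀ :: tl).map (pvNrm lam.length)).count k : Int)
        = ((tl.map (pvNrm lam.length)).count k : Int) + (if k = k₀ then 1 else 0) := by
      rw [List.map_cons, List.count_cons, ← hk₀]
      rcases eq_or_ne k k₀ with rfl | hne
      · simp
      · simp [hne, Ne.symm hne]
    rw [hsv, hcnt]; ring

-- ===== VERDICT (by name: the statement is the Claim_ definition above) =====
theorem powerOff_spec : Claim_equal_powerOff := by
  intro switch lamp idx _ hpre
  unfold Spec_powerOff powerOff powerOff_alt
  obtain ⟨-, h2⟩ := hpre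
  set s := (PySem.List.pyGet? switch idx).getD [] with hs
  simp only []
  rw [loopA lamp.length s lamp true rfl h2, Bool.true_and]
  obtain ⟨hlen, hval⟩ := decFold s lamp h2
  rw [Bool.eq_iff_iff]
  simp only [List.all_eq_true, decide_eq_true_eq]
  constructor
  · intro hall l hl
    rw [pyGetD_nrm _ _ (hlen ▸ h2 l hl), hlen, hval]
    have := hall l hl
    omega
  · intro hall l hl
    have := hall l hl
    rw [pyGetD_nrm _ _ (hlen ▸ h2 l hl), hlen, hval] at this
    omega
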